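-- pv_equiv track=rewrite | github.com/TNwkrk/knowledge-forge | src/knowledge_forge/compile/topic_pages.py | _normalize_llm_markdown
-- ===== SOURCE A (Python) =====
-- def _normalize_llm_markdown(payload: str) -> list[str]:
--     lines = [line.rstrip() for line in payload.strip().splitlines() if line.strip()]
--     if not lines:
--         return []
--
--     normalized: list[str] = []
--     for index, line in enumerate(lines):
--         stripped = line.strip()
--         if stripped.startswith("[Source:") and normalized:
--             normalized[-1] = f"{normalized[-1]} {stripped}"
--             continue
--         if "[Source:" in line:
--             normalized.append(line)
--             continue
--         next_line = lines[index + 1].strip() if index + 1 < len(lines) else None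
--         if next_line and next_line.startswith("[Source:"):
--             normalized.append(line)
--     return normalized
-- ===== SOURCE B (Python) =====
-- def _normalize_llm_markdown(payload: str) -> list[str]:
--     out: list[str] = []
--     pending = None  # last plain content line, kept only if a [Source: line follows
--     for line in (l.rstrip() for l in payload.strip().splitlines() if l.strip()):
--         stripped = line.strip()
--         if stripped.startswith("[Source:"):
--             if pending is not None:
--                 out.append(pending)
--                 pending = None
--             if out:
--                 out[-1] = f"{out[-1]} {stripped}"
--             else:
--                 out.append(line)
--         elif "[Source:" in line:
--             out.append(line)
--             pending = None
--         else:
--             pending = line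
--     return out
-- ===== Notes on version B (the rewrite author's own statement) =====
-- stated objective: alternative
-- what changed: Replaced A's enumerate loop with an index+1 lookahead into lines by a single-pass state machine that defers each plain content line in a `pending` variable and flushes it only when a [Source: line follows.
import Mathlib
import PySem

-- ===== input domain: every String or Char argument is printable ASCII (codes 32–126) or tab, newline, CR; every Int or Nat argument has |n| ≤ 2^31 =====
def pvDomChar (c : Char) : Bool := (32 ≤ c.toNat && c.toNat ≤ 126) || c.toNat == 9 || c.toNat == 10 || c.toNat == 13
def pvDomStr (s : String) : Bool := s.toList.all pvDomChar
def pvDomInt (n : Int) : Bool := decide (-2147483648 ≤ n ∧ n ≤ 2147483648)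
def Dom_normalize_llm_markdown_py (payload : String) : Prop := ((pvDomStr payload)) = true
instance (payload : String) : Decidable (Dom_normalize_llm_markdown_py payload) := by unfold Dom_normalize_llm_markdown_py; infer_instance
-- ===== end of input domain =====

-- B replaces A's index+1 lookahead with a single-pass state machine holding one deferred
-- `pending` content line (objective: alternative decomposition, same cost).

-- ===== PORT A =====
-- the preprocessed lines: [line.rstrip() for line in payload.strip().splitlines() if line.strip()]
def pvLines (payload : String) : List String :=
  (((PySem.Str.splitlines (PySem.Str.strip payload)).filter
      (fun l => PySem.Str.strip l != "")).map PySem.Str.rstrip)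

-- A's for-loop: structural recursion; `rest.head?` is A's `lines[index+1]` lookahead
def pvLoopA (acc : List String) : List String → List String
  | [] => acc
  | line :: rest =>
    let stripped := PySem.Str.strip line
    if PySem.Str.startswith stripped "[Source:" && !acc.isEmpty then
      pvLoopA (acc.dropLast ++ [(acc.getLast?.getD "") ++ " " ++ stripped]) rest
    else if PySem.Str.isIn "[Source:" line then
      pvLoopA (acc ++ [line]) rest
    else
      let nextKeep :=
        match rest with
        | [] => false
        | nl :: _ =>
          let n := PySem.Str.strip nl
          (n != "") && PySem.Str.startswith n "[Source:"
      if nextKeep then pvLoopA (acc ++ [line]) rest else pvLoopA acc rest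

def normalize_llm_markdown_py (payload : String) : List String :=
  let lines := pvLines payload
  if lines.isEmpty then [] else pvLoopA [] lines

-- ===== PORT B =====
-- B's loop: `pending` holds the last plain content line, flushed only when a [Source: line follows
def pvLoopB (out : List String) (pending : Option String) : List String → List String
  | [] => out
  | line :: rest =>
    let stripped := PySem.Str.strip line
    if PySem.Str.startswith stripped "[Source:" then
      let out' := match pending with | some p => out ++ [p] | none => out
      if out'.isEmpty then pvLoopB (out' ++ [line]) none rest
      else pvLoopB (out'.dropLast ++ [(out'.getLast?.getD "") ++ " " ++ stripped]) none rest
    else if PySem.Str.isIn "[Source:" line then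
      pvLoopB (out ++ [line]) none rest
    else
      pvLoopB out (some line) rest

def normalize_llm_markdown_py_alt (payload : String) : List String :=
  pvLoopB [] none (pvLines payload)

-- ===== PRECONDITION & SPEC =====
def Spec_normalize_llm_markdown_py (payload : String) (out : List String) : Prop := out = normalize_llm_markdown_py_alt payload
instance (payload : String) (out : List String) : Decidable (Spec_normalize_llm_markdown_py payload out) := by unfold Spec_normalize_llm_markdown_py; infer_instance

-- ===== CLAIM (what is proved, stated in full; the proofs are below) =====
def Claim_equal_normalize_llm_markdown_py : Prop := ∀ (payload : String), Dom_normalize_llm_markdown_py payload → Spec_normalize_llm_markdown_py payload (normalize_llm_markdown_py payload)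

-- ===== LEMMAS AND PROOFS =====

-- the stripped text is an infix of the line
theorem pv_strip_infix (cs : List Char) : PySem.Chars.strip cs <:+: cs := by
  have h1 : PySem.Chars.lstrip cs <:+ cs := List.dropWhile_suffix _
  have h2 : PySem.Chars.rstrip (PySem.Chars.lstrip cs) <+: PySem.Chars.lstrip cs := by
    simpa [PySem.Chars.rstrip] using
      (List.dropWhile_suffix (l := (PySem.Chars.lstrip cs).reverse) PySem.Chars.isspace).reverse
  exact (h2.isInfix).trans h1.isInfix

-- if line.strip() starts with "[Source:" then "[Source:" in line
theorem pv_startswith_strip_isIn (line : String)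
    (h : PySem.Str.startswith (PySem.Str.strip line) "[Source:" = true) :
    PySem.Str.isIn "[Source:" line = true := by
  rw [PySem.Str.isIn_iff_infix]
  have h' : ("[Source:".toList) <+: (PySem.Str.strip line).toList := by
    have := (PySem.Str.startswith_eq (PySem.Str.strip line) "[Source:")
    rw [this] at h
    exact (PySem.Chars.startswith_iff _ _).mp h
  have hs : (PySem.Str.strip line).toList = PySem.Chars.strip line.toList := by
    simp [PySem.Str.toList_strip]
  rw [hs] at h'
  exact h'.isInfix.trans (pv_strip_infix line.toList)

-- a line whose strip starts with "[Source:" has nonempty strip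
theorem pv_startswith_strip_ne (line : String)
    (h : PySem.Str.startswith (PySem.Str.strip line) "[Source:" = true) :
    (PySem.Str.strip line != "") = true := by
  have h' : ("[Source:".toList) <+: (PySem.Str.strip line).toList := by
    have := (PySem.Str.startswith_eq (PySem.Str.strip line) "[Source:")
    rw [this] at h
    exact (PySem.Chars.startswith_iff _ _).mp h
  simp only [bne_iff_ne, ne_eq]
  intro he
  rw [he] at h'
  simp at h'

-- the one-line-lookahead loop of A equals the pending-state loop of B
theorem pv_loops (rest : List String) :
    (∀ acc, pvLoopA acc rest = pvLoopB acc none rest) ∧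
    (∀ acc p, pvLoopB acc (some p) rest =
      (match rest with
        | [] => pvLoopA acc rest
        | nl :: _ =>
          if ((PySem.Str.strip nl != "") && PySem.Str.startswith (PySem.Str.strip nl) "[Source:") then
            pvLoopA (acc ++ [p]) rest
          else pvLoopA acc rest)) := by
  induction rest with
  | nil => exact ⟨fun acc => rfl, fun acc p => rfl⟩
  | cons line rest ih =>
    obtain ⟨ih1, ih2⟩ := ih
    constructor
    · intro acc
      by_cases hsw : PySem.Str.startswith (PySem.Str.strip line) "[Source:" = true
      · by_cases hacc : acc = []
        · subst hacc
          have hin := pv_startswith_strip_isIn line hsw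
          simp only [pvLoopA, pvLoopB, hsw, hin, List.isEmpty_nil, Bool.not_true,
            Bool.and_false, if_pos, Bool.false_eq_true, ite_false]
          exact ih1 [line]
        · have hne : acc.isEmpty = false := by simp [hacc]
          simp only [pvLoopA, pvLoopB, hsw, hne, Bool.not_false, Bool.and_true, ite_true]
          rw [if_neg (by simp)]
          exact ih1 _
      · have hsw' : PySem.Str.startswith (PySem.Str.strip line) "[Source:" = false := by
          simpa using hsw
        by_cases hin : PySem.Str.isIn "[Source:" line = true
        · simp only [pvLoopA, pvLoopB, hsw', hin, Bool.false_and, ite_false, ite_true,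
            Bool.false_eq_true]
          exact ih1 _
        · have hin' : PySem.Str.isIn "[Source:" line = false := by simpa using hin
          simp only [pvLoopA, pvLoopB, hsw', hin', Bool.false_and, Bool.false_eq_true,
            ite_false]
          rw [ih2 acc line]
          cases rest with
          | nil => rfl
          | cons nl rest' => rfl
    · intro acc p
      by_cases hsw : PySem.Str.startswith (PySem.Str.strip line) "[Source:" = true
      · have hne := pv_startswith_strip_ne line hsw
        simp only [hne, hsw, Bool.true_and, ite_true]
        have hA : pvLoopA (acc ++ [p]) (line :: rest) =
            pvLoopA (acc ++ [p ++ " " ++ PySem.Str.strip line]) rest := by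
          simp only [pvLoopA, hsw]
          rw [if_pos (by simp)]
          simp
        rw [hA]
        have hB : pvLoopB acc (some p) (line :: rest) =
            pvLoopB (acc ++ [p ++ " " ++ PySem.Str.strip line]) none rest := by
          simp only [pvLoopB, hsw, ite_true]
          rw [if_neg (by simp)]
          simp
        rw [hB]
        exact (ih1 _).symm
      · have hsw' : PySem.Str.startswith (PySem.Str.strip line) "[Source:" = false := by
          simpa using hsw
        simp only [hsw', Bool.and_false, Bool.false_eq_true, ite_false]
        by_cases hin : PySem.Str.isIn "[Source:" line = true
        · simp only [pvLoopA, pvLoopB, hsw', hin, Bool.false_and, Bool.false_eq_true,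
            ite_false, ite_true]
          exact (ih1 _).symm
        · have hin' : PySem.Str.isIn "[Source:" line = false := by simpa using hin
          simp only [pvLoopA, pvLoopB, hsw', hin', Bool.false_and, Bool.false_eq_true,
            ite_false]
          rw [ih2 acc line]
          cases rest with
          | nil => rfl
          | cons nl rest' => rfl

-- ===== VERDICT (by name: the statement is the Claim_ definition above) =====
theorem normalize_llm_markdown_py_spec : Claim_equal_normalize_llm_markdown_py := by
  intro payload _
  unfold Spec_normalize_llm_markdown_py normalize_llm_markdown_py normalize_llm_markdown_py_alt
  cases h : pvLines payload with
  | nil => simp [pvLoopB]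
  | cons l ls =>
    simp only [List.isEmpty_cons, Bool.false_eq_true, ite_false]
    exact (pv_loops (l :: ls)).1 []
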